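-- pv_equiv track=rewrite | github.com/sashsinha/meta_coding_puzzles | level_1/cafeteria.py | max_additional_diners
-- ===== SOURCE A (Python) =====
-- from typing import List
--
-- def max_additional_diners(n: int, k: int, s: List[int]) -> int:
--     """Compute the maximum number of additional diners that can be seated."""
--     # Sort the occupied seats.
--     s.sort()
--     additional: int = 0
--     # Left gap: seats from 1 up to s[0]-1.
--     left_gap: int = s[0] - 1
--     additional += left_gap // (k + 1)
--     # Middle gaps: for each adjacent pair, skip the k seats on the right
--     # of the left diner. The gap between s[i] and s[i+1] is:
--     #   gap = s[i+1] - s[i] - 1 - k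
--     # Only if gap is positive can we seat additional diners.
--     for i in range(len(s) - 1):
--         gap: int = s[i + 1] - s[i] - 1 - k
--         if gap > 0:
--             additional += gap // (k + 1)
--     # Right gap: seats from s[-1]+1 up to n.
--     right_gap: int = n - s[-1]
--     additional += right_gap // (k + 1)
--     return additional
-- ===== SOURCE B (Python) =====
-- def max_additional_diners(n, k, s):
--     """Compute the maximum number of additional diners that can be seated."""
--     s.sort()
--     d = k + 1
--     # End contributions (also raises IndexError on empty s, like the gap formula needs s[0]).
--     ends = (s[0] - 1) // d + (n - s[-1]) // d
--
--     def fits(gap):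
--         # Diners fitting strictly inside a run of `gap` free seats between two diners.
--         return max(gap - k, 0) // d
--
--     def solve(i, j):
--         # Diners fitting between seats s[i] .. s[j-1], divide and conquer on the index range.
--         if j - i <= 1:
--             return 0
--         m = (i + j) // 2
--         return solve(i, m) + solve(m, j) + fits(s[m] - s[m - 1] - 1)
--
--     return ends + solve(0, len(s))
-- ===== Notes on version B (the rewrite author's own statement) =====
-- stated objective: alternative
-- what changed: Replaces A's linear indexed loop over adjacent pairs (plus separate left/right gap cases) by a divide-and-conquer recursion over index ranges of the sorted list, each merge adding the branch-free capacity max(gap-k,0)//(k+1) of the bridging gap.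
import Mathlib
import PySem

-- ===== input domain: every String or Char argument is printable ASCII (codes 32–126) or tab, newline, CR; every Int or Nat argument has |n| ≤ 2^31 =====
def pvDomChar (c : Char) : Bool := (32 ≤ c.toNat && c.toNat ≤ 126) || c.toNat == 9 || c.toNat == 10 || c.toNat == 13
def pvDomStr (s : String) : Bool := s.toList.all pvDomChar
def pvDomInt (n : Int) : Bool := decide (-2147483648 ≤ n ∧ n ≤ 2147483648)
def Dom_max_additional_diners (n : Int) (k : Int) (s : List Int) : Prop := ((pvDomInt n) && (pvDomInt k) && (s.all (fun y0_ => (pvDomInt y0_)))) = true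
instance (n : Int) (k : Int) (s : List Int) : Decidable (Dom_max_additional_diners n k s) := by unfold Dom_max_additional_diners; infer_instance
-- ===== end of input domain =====

-- B is an alternative decomposition (divide-and-conquer over index ranges instead of a linear
-- indexed loop); both Pythons sort s in place, only the return value is modelled here.

-- ===== PORT A =====
def max_additional_diners (n : Int) (k : Int) (s : List Int) : Int :=
  let t := PySem.List.sorted s (fun x => x) false
  let additional : Int := 0
  let left_gap : Int := PySem.List.pyGetD t 0 0 - 1
  let additional := additional + PySem.Int.floordiv left_gap (k + 1)
  let additional := (PySem.List.pyRange 0 ((t.length : Int) - 1) 1).foldl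
    (fun acc i =>
      let gap : Int := PySem.List.pyGetD t (i + 1) 0 - PySem.List.pyGetD t i 0 - 1 - k
      if gap > 0 then acc + PySem.Int.floordiv gap (k + 1) else acc) additional
  let right_gap : Int := n - PySem.List.pyGetD t (-1) 0
  additional + PySem.Int.floordiv right_gap (k + 1)

-- ===== PORT B =====
-- fits(gap): diners fitting strictly inside a run of `gap` free seats between two diners
def madFits (k : Int) (gap : Int) : Int :=
  PySem.Int.floordiv (max (gap - k) 0) (k + 1)

-- solve(i, j): divide and conquer on the index range; (i+j)//2 on Nat = Python's // on these nonneg ints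
def madSolve (k : Int) (t : List Int) (i j : Nat) : Int :=
  if j ≤ i + 1 then 0
  else
    let m := (i + j) / 2
    madSolve k t i m + madSolve k t m j + madFits k (t.getD m 0 - t.getD (m - 1) 0 - 1)
  termination_by j - i
  decreasing_by all_goals omega

def max_additional_diners_alt (n : Int) (k : Int) (s : List Int) : Int :=
  let t := PySem.List.sorted s (fun x => x) false
  let d := k + 1
  let ends := PySem.Int.floordiv (PySem.List.pyGetD t 0 0 - 1) d
              + PySem.Int.floordiv (n - PySem.List.pyGetD t (-1) 0) d
  ends + madSolve k t 0 t.length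

-- ===== PRECONDITION & SPEC =====
-- Pre_ excludes exactly the inputs where A raises: empty s (IndexError on s[0]) and k = -1 (ZeroDivisionError).
def Pre_max_additional_diners (n : Int) (k : Int) (s : List Int) : Prop := s ≠ [] ∧ k ≠ -1
instance (n : Int) (k : Int) (s : List Int) : Decidable (Pre_max_additional_diners n k s) := by unfold Pre_max_additional_diners; infer_instance
def pvWitness_max_additional_diners : Int × Int × List Int := (10, 1, [3, 6])
def Spec_max_additional_diners (n : Int) (k : Int) (s : List Int) (out : Int) : Prop := out = max_additional_diners_alt n k s
instance (n : Int) (k : Int) (s : List Int) (out : Int) : Decidable (Spec_max_additional_diners n k s out) := by unfold Spec_max_additional_diners; infer_instance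

-- ===== CLAIM (what is proved, stated in full; the proofs are below) =====
def Claim_equal_max_additional_diners : Prop := ∀ (n : Int) (k : Int) (s : List Int), Dom_max_additional_diners n k s → Pre_max_additional_diners n k s → Spec_max_additional_diners n k s (max_additional_diners n k s)

-- ===== LEMMAS AND PROOFS =====

-- B's branch-free per-gap term equals A's guarded term
lemma mad_term (k x prev : Int) :
    madFits k (x - prev - 1)
      = if x - prev - 1 - k > 0 then PySem.Int.floordiv (x - prev - 1 - k) (k + 1) else 0 := by
  unfold madFits
  split_ifs with hg
  · rw [max_eq_left (by omega)]
  · rw [max_eq_right (by omega)]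
    simp [PySem.Int.floordiv]

-- the divide-and-conquer recursion sums the bridging-gap terms over the whole index range
lemma madSolve_eq_sum (k : Int) (t : List Int) :
    ∀ (N i j : Nat), j - i ≤ N →
      madSolve k t i j
        = ∑ p ∈ Finset.Ico (i + 1) j, madFits k (t.getD p 0 - t.getD (p - 1) 0 - 1) := by
  intro N
  induction N with
  | zero =>
      intro i j h
      rw [madSolve]
      rw [if_pos (by omega)]
      rw [Finset.Ico_eq_empty (by omega), Finset.sum_empty]
  | succ N ih =>
      intro i j h
      rw [madSolve]
      by_cases hij : j ≤ i + 1
      · rw [if_pos hij, Finset.Ico_eq_empty (by omega), Finset.sum_empty]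
      · rw [if_neg hij]
        show madSolve k t i ((i + j) / 2) + madSolve k t ((i + j) / 2) j
              + madFits k (t.getD ((i + j) / 2) 0 - t.getD ((i + j) / 2 - 1) 0 - 1) = _
        rw [ih i ((i + j) / 2) (by omega), ih ((i + j) / 2) j (by omega)]
        rw [← Finset.sum_Ico_consecutive
              (fun p => madFits k (t.getD p 0 - t.getD (p - 1) 0 - 1))
              (by omega : i + 1 ≤ (i + j) / 2) (by omega : (i + j) / 2 ≤ j),
            Finset.sum_eq_sum_Ico_succ_bot (by omega :
              (i + j) / 2 < j) (fun p => madFits k (t.getD p 0 - t.getD (p - 1) 0 - 1))]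
        ring

-- a foldl adding a guarded term is the accumulator plus the sum of the guarded terms
lemma mad_foldl_sum (f : Nat → Int) (c : Nat → Prop) [DecidablePred c] :
    ∀ (L : List Nat) (acc : Int),
      L.foldl (fun a i => if c i then a + f i else a) acc
        = acc + (L.map (fun i => if c i then f i else 0)).sum := by
  intro L
  induction L with
  | nil => intro acc; simp
  | cons x L ih =>
      intro acc
      simp only [List.foldl_cons, List.map_cons, List.sum_cons]
      by_cases hc : c x
      · rw [if_pos hc, if_pos hc, ih]; ring
      · rw [if_neg hc, if_neg hc, ih]; ring

-- sum of a mapped List.range is the Finset.range sum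
lemma mad_range_sum (N : Nat) (g : Nat → Int) :
    ((List.range N).map g).sum = ∑ j ∈ Finset.range N, g j := by
  induction N with
  | zero => simp
  | succ N ih => rw [List.range_succ, Finset.sum_range_succ, List.map_append, List.sum_append, ih]; simp

-- ===== VERDICT (by name: the statement is the Claim_ definition above) =====
theorem max_additional_diners_spec : Claim_equal_max_additional_diners := by
  intro n k s hdom hpre
  obtain ⟨hs, hk⟩ := hpre
  unfold Spec_max_additional_diners max_additional_diners max_additional_diners_alt
  have hne : (PySem.List.sorted s (fun x => x) false) ≠ [] :=
    fun h => hs ((PySem.List.sorted_eq_nil_iff _ _ _).mp h)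
  revert hne
  generalize PySem.List.sorted s (fun x => x) false = t
  intro hne
  have hlen : 1 ≤ t.length := List.length_pos_iff.mpr hne
  simp only []
  have hcast : ((t.length : Int) - 1) = ((t.length - 1 : Nat) : Int) := by omega
  rw [hcast, PySem.List.pyRange_one 0 ((t.length - 1 : Nat) : Int)]
  simp only [sub_zero, Int.toNat_natCast, List.foldl_map, zero_add]
  have hbody : ∀ (acc : Int) (j : Nat),
      (if (0:Int) < PySem.List.pyGetD t ((j : Int) + 1) 0 - PySem.List.pyGetD t (j : Int) 0 - 1 - k then
         acc + PySem.Int.floordiv (PySem.List.pyGetD t ((j : Int) + 1) 0 - PySem.List.pyGetD t (j : Int) 0 - 1 - k) (k + 1)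
       else acc)
      = (if (0:Int) < t.getD (j + 1) 0 - t.getD j 0 - 1 - k then
           acc + PySem.Int.floordiv (t.getD (j + 1) 0 - t.getD j 0 - 1 - k) (k + 1)
         else acc) := by
    intro acc j
    have hc : ((j : Int) + 1) = ((j + 1 : Nat) : Int) := by push_cast; ring
    rw [hc, PySem.List.pyGetD_natCast, PySem.List.pyGetD_natCast]
  simp only [hbody]
  rw [mad_foldl_sum (fun j => PySem.Int.floordiv (t.getD (j + 1) 0 - t.getD j 0 - 1 - k) (k + 1))
        (fun j => (0:Int) < t.getD (j + 1) 0 - t.getD j 0 - 1 - k)]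
  rw [madSolve_eq_sum k t t.length 0 t.length (by omega)]
  rw [Finset.sum_Ico_eq_sum_range]
  have hterm : ∀ j ∈ Finset.range (t.length - 1),
      madFits k (t.getD (1 + j) 0 - t.getD (1 + j - 1) 0 - 1)
        = (if (0:Int) < t.getD (j + 1) 0 - t.getD j 0 - 1 - k then
             PySem.Int.floordiv (t.getD (j + 1) 0 - t.getD j 0 - 1 - k) (k + 1)
           else (0:Int)) := by
    intro j _
    have h1 : 1 + j = j + 1 := by omega
    have h2 : j + 1 - 1 = j := by omega
    rw [h1, h2]
    rw [mad_term k (t.getD (j + 1) 0) (t.getD j 0)]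
  rw [Finset.sum_congr rfl hterm]
  rw [← mad_range_sum]
  ring
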